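-- pv_equiv track=rewrite | github.com/Righty2004/flagionary-bot | flag_func.py | hint_creator
-- ===== SOURCE A (Python) =====
-- def hint_creator(answer):
--     hint = answer[0]
--     for i in range(1, len(answer)):
--         if answer[i] != ' ':
--             hint += ' _'
--
--         else:
--             hint += ' '
--
--     return f"`{hint}`"
-- ===== SOURCE B (Python) =====
-- def hint_creator(answer):
--     first = answer[0]
--     words = answer.split(' ')
--     masks = [' _' * len(w) for w in words]
--     if words[0]:
--         masks[0] = first + ' _' * (len(words[0]) - 1)
--     return f"`{' '.join(masks)}`"
-- ===== Notes on version B (the rewrite author's own statement) =====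
-- stated objective: alternative
-- what changed: Replaces the per-character branch loop with a split-on-space / per-word mask / join decomposition, revealing the first letter only when the first word is nonempty (a leading space is then supplied by the join separator).
-- outside the precondition, e.g. on hint_creator(''): A raises IndexError, B raises IndexError
import Mathlib
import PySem

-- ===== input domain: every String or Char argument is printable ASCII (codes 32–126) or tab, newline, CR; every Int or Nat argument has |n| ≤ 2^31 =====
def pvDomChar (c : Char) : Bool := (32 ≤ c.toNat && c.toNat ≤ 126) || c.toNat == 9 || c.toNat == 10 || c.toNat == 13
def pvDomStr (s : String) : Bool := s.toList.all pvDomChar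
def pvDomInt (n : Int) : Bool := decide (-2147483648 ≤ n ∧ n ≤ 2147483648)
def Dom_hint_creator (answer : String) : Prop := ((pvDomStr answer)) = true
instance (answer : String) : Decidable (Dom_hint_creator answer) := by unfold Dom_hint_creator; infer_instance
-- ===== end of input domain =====

-- B replaces A's per-character branch loop by a split-on-space / per-word mask / join
-- decomposition (objective: alternative; a timing run measured B faster via the single join).

-- ===== PORT A =====
def hint_creator (answer : String) : String :=
  let cs := answer.toList
  -- hint = answer[0]  (valid under Pre_: answer is nonempty)
  let hint : List Char := [PySem.List.pyGetD cs 0 ' ']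
  -- for i in range(1, len(answer)): hint += ' _' if answer[i] != ' ' else ' '
  let hint := (PySem.List.pyRange 1 (cs.length : Int) 1).foldl
      (fun h x => if PySem.List.pyGetD cs x ' ' ≠ ' ' then h ++ [' ', '_'] else h ++ [' ']) hint
  String.mk ('`' :: hint ++ ['`'])

-- ===== PORT B =====
def hint_creator_alt (answer : String) : String :=
  let cs := answer.toList
  let first := PySem.List.pyGetD cs 0 ' '        -- answer[0], valid under Pre_
  let words := PySem.Chars.splitOn cs [' ']      -- answer.split(' ')
  let masks := words.map (fun w => PySem.List.pyRepeat [' ', '_'] (w.length : Int))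
  let masks :=
    match words with
    | [] => masks                                 -- unreachable: split always returns ≥ 1 piece
    | w0 :: _ =>
      if w0 ≠ [] then
        (first :: PySem.List.pyRepeat [' ', '_'] ((w0.length : Int) - 1)) :: masks.tail
      else masks
  String.mk ('`' :: PySem.Chars.join [' '] masks ++ ['`'])

-- ===== PRECONDITION & SPEC =====
-- Pre_ excludes only the empty string, on which A raises IndexError (answer[0]).
def Pre_hint_creator (answer : String) : Prop := answer ≠ ""
instance (answer : String) : Decidable (Pre_hint_creator answer) := by unfold Pre_hint_creator; infer_instance
def pvWitness_hint_creator : String := "ab cd"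

def Spec_hint_creator (answer : String) (out : String) : Prop := out = hint_creator_alt answer
instance (answer : String) (out : String) : Decidable (Spec_hint_creator answer out) := by unfold Spec_hint_creator; infer_instance

-- ===== CLAIM (what is proved, stated in full; the proofs are below) =====
def Claim_equal_hint_creator : Prop := ∀ (answer : String), Dom_hint_creator answer → Pre_hint_creator answer → Spec_hint_creator answer (hint_creator answer)

-- ===== LEMMAS AND PROOFS =====

-- the contribution of one non-first character in A's loop
def pvG (c : Char) : List Char := if c ≠ ' ' then [' ', '_'] else [' ']

-- structural model of str.split(' ')
def pvConsHead (x : List Char) : List (List Char) → List (List Char)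
  | [] => [x]
  | w :: ws => (x ++ w) :: ws

def pvSplit : List Char → List (List Char)
  | [] => [[]]
  | c :: t => if c = ' ' then [] :: pvSplit t else pvConsHead [c] (pvSplit t)

def pvMask (w : List Char) : List Char := PySem.List.pyRepeat [' ', '_'] (w.length : Int)

theorem pvSplit_space (t : List Char) : pvSplit (' ' :: t) = [] :: pvSplit t := by
  simp [pvSplit]

theorem pvSplit_nonspace (c : Char) (t : List Char) (h : c ≠ ' ') :
    pvSplit (c :: t) = pvConsHead [c] (pvSplit t) := by
  simp [pvSplit, h]

theorem pvSplit_ne_nil (l : List Char) : pvSplit l ≠ [] := by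
  cases l with
  | nil => simp [pvSplit]
  | cons c t =>
    simp only [pvSplit]
    split_ifs
    · simp
    · cases h : pvSplit t <;> simp [pvConsHead]

theorem pvConsHead_append (a b : List Char) (ls : List (List Char)) :
    pvConsHead (a ++ b) ls = pvConsHead a (pvConsHead b ls) := by
  cases ls <;> simp [pvConsHead]

theorem pvConsHead_nil (ls : List (List Char)) (h : ls ≠ []) : pvConsHead [] ls = ls := by
  cases ls with
  | nil => exact absurd rfl h
  | cons w ws => simp [pvConsHead]

theorem pv_go_nil (fuel : Nat) (cur : List Char) (acc : List (List Char)) :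
    PySem.Chars.splitOn.go [' '] fuel [] cur acc = (cur.reverse :: acc).reverse := by
  cases fuel <;> (rw [PySem.Chars.splitOn.go]; simp)

theorem pv_go_space (fuel : Nat) (rest cur : List Char) (acc : List (List Char)) :
    PySem.Chars.splitOn.go [' '] (fuel+1) (' '::rest) cur acc
      = PySem.Chars.splitOn.go [' '] fuel rest [] (cur.reverse :: acc) := by
  rw [PySem.Chars.splitOn.go]; simp

theorem pv_go_nonspace (fuel : Nat) (c : Char) (rest cur : List Char) (acc : List (List Char))
    (h : c ≠ ' ') :
    PySem.Chars.splitOn.go [' '] (fuel+1) (c::rest) cur acc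
      = PySem.Chars.splitOn.go [' '] fuel rest (c :: cur) acc := by
  rw [PySem.Chars.splitOn.go]; simp [List.isPrefixOf, h.symm]

theorem pv_go_spec (l : List Char) : ∀ (fuel : Nat) (cur : List Char) (acc : List (List Char)),
    l.length ≤ fuel →
    PySem.Chars.splitOn.go [' '] fuel l cur acc = acc.reverse ++ pvConsHead cur.reverse (pvSplit l) := by
  induction l with
  | nil =>
    intro fuel cur acc _
    rw [pv_go_nil]
    simp [pvSplit, pvConsHead]
  | cons c rest ih =>
    intro fuel cur acc hf
    cases fuel with
    | zero => simp at hf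
    | succ fuel' =>
      by_cases hc : c = ' '
      · subst hc
        rw [pv_go_space, ih fuel' [] (cur.reverse :: acc) (by simpa using hf), pvSplit_space]
        rw [show (([] : List Char)).reverse = [] from rfl, pvConsHead_nil _ (pvSplit_ne_nil rest)]
        cases h : pvSplit rest <;> simp [pvConsHead]
      · rw [pv_go_nonspace _ _ _ _ _ hc, ih fuel' (c :: cur) acc (by simpa using hf)]
        rw [pvSplit_nonspace c rest hc, List.reverse_cons, pvConsHead_append]

theorem pv_splitOn_eq (l : List Char) : PySem.Chars.splitOn l [' '] = pvSplit l := by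
  show PySem.Chars.splitOn.go [' '] (l.length + 1) l [] [] = pvSplit l
  rw [pv_go_spec l (l.length + 1) [] [] (by omega)]
  simpa using pvConsHead_nil _ (pvSplit_ne_nil l)

theorem pvMask_def (w : List Char) :
    PySem.List.pyRepeat [' ', '_'] (w.length : Int) = pvMask w := rfl

theorem pvMask_nil : pvMask [] = [] := by simp [pvMask, PySem.List.pyRepeat]

theorem pvMask_cons (c : Char) (w : List Char) : pvMask (c :: w) = ' ' :: '_' :: pvMask w := by
  simp [pvMask, PySem.List.pyRepeat, List.replicate_succ]

theorem pv_ic_cons (s : List Char) (ms : List (List Char)) :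
    [' '].intercalate (s :: ms) = if ms = [] then s else s ++ [' '] ++ [' '].intercalate ms := by
  cases ms <;> simp [List.intercalate, List.intersperse]

theorem pv_ic_cons_append (x s : List Char) (ms : List (List Char)) :
    [' '].intercalate ((x ++ s) :: ms) = x ++ [' '].intercalate (s :: ms) := by
  rw [pv_ic_cons, pv_ic_cons]
  split_ifs <;> simp

theorem pv_join_eq (l : List Char) :
    [' '].intercalate ((pvSplit l).map pvMask) = l.flatMap pvG := by
  induction l with
  | nil => simp [pvSplit, pvMask_nil, List.intercalate]
  | cons c t ih =>
    by_cases hc : c = ' '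
    · subst hc
      rw [pvSplit_space]
      simp only [List.map_cons, pvMask_nil]
      rw [pv_ic_cons]
      have hne : (pvSplit t).map pvMask ≠ [] := by
        simpa using pvSplit_ne_nil t
      rw [if_neg hne, ih]
      simp [pvG]
    · obtain ⟨w, ws, hw⟩ : ∃ w ws, pvSplit t = w :: ws := by
        cases h : pvSplit t with
        | nil => exact absurd h (pvSplit_ne_nil t)
        | cons w ws => exact ⟨w, ws, rfl⟩
      rw [pvSplit_nonspace c t hc, hw]
      simp only [pvConsHead, List.map_cons]
      rw [show ([c] ++ w) = c :: w from rfl, pvMask_cons,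
        show (' ' :: '_' :: pvMask w) = [' ', '_'] ++ pvMask w from rfl, pv_ic_cons_append]
      rw [hw] at ih
      simp only [List.map_cons] at ih
      rw [ih]
      simp [pvG, hc]

theorem pv_foldA (t : List Char) : ∀ (h : List Char),
    t.foldl (fun h x => if x ≠ ' ' then h ++ [' ', '_'] else h ++ [' ']) h = h ++ t.flatMap pvG := by
  induction t with
  | nil => intro h; simp
  | cons c t ih =>
    intro h
    simp only [List.foldl_cons, List.flatMap_cons, ih, pvG]
    split_ifs <;> simp

-- ===== VERDICT (by name: the statement is the Claim_ definition above) =====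
theorem hint_creator_spec : Claim_equal_hint_creator := by
  intro answer _ hpre
  show hint_creator answer = hint_creator_alt answer
  have hne : answer.toList ≠ [] := by simpa using hpre
  obtain ⟨c, t, hct⟩ : ∃ c t, answer.toList = c :: t := by
    cases h : answer.toList with
    | nil => exact absurd h hne
    | cons c t => exact ⟨c, t, rfl⟩
  unfold hint_creator hint_creator_alt
  simp only [hct, pv_splitOn_eq, PySem.Chars.join]
  rw [PySem.List.foldl_pyRange_pyGetD' (c :: t) ' '
      (fun h x => if x ≠ ' ' then h ++ [' ', '_'] else h ++ [' ']) _ (by norm_num)]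
  simp only [Int.toNat_one, List.drop_succ_cons, List.drop_zero, pv_foldA,
    PySem.List.pyGetD_zero_cons]
  by_cases hc : c = ' '
  · subst hc
    rw [pvSplit_space]
    simp only [List.map_cons]
    rw [if_neg (by simp),
      show PySem.List.pyRepeat [' ', '_'] ((([] : List Char)).length : Int) = [] from by
        simp [PySem.List.pyRepeat]]
    rw [pv_ic_cons, if_neg (by simpa using pvSplit_ne_nil t)]
    have hj : [' '].intercalate ((pvSplit t).map pvMask) = t.flatMap pvG := pv_join_eq t
    simp only [pvMask_def]
    rw [hj]
    simp
  · obtain ⟨w, ws, hw⟩ : ∃ w ws, pvSplit t = w :: ws := by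
      cases h : pvSplit t with
      | nil => exact absurd h (pvSplit_ne_nil t)
      | cons w ws => exact ⟨w, ws, rfl⟩
    rw [pvSplit_nonspace c t hc, hw]
    simp only [pvConsHead, List.map_cons]
    rw [if_pos (by simp)]
    have hrep : PySem.List.pyRepeat [' ', '_'] (((([c] ++ w)).length : Int) - 1) = pvMask w := by
      simp [pvMask]
    rw [hrep, List.tail_cons,
      show (c :: pvMask w) = [c] ++ pvMask w from rfl, pv_ic_cons_append]
    have hj : [' '].intercalate ((pvSplit t).map pvMask) = t.flatMap pvG := pv_join_eq t
    rw [hw, List.map_cons] at hj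
    simp only [pvMask_def]
    rw [hj]
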